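-- pv_equiv track=rewrite | github.com/TBIAPBC/APBC2021 | A4/MarkusBeicht-KLetShuffle.py | CountOutDegrees
-- ===== SOURCE A (Python) =====
-- def CountOutDegrees(edges, n):
-- 	outdeg = []
-- 	for i in range(n):
-- 		out = 0
-- 		for edge in edges:
-- 			if edge[0] == i:
-- 				out += 1
-- 		outdeg.append(out)
-- 	return outdeg
-- ===== SOURCE B (Python) =====
-- def CountOutDegrees(edges, n):
--     outdeg = [0] * n
--     for s, _ in edges:
--         if 0 <= s < n:
--             outdeg[s] += 1
--     return outdeg
-- ===== Notes on version B (the rewrite author's own statement) =====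
-- stated objective: faster
-- what changed: Replaced the O(n*E) nested scan (for each vertex, scan all edges) by a single pass over the edges incrementing a count array indexed by the edge's source vertex.
import Mathlib
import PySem

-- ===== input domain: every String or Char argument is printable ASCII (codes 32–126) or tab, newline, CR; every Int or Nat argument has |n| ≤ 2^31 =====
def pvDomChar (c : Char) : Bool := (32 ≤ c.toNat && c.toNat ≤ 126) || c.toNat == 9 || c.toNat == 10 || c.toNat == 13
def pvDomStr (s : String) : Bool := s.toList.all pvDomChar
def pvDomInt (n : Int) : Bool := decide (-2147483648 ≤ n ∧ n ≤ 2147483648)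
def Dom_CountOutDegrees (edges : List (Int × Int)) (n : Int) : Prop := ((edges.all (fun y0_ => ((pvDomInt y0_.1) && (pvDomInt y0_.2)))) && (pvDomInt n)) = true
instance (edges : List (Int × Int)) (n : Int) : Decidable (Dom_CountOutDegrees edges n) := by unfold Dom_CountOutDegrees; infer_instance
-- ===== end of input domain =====

-- B replaces A's per-vertex rescans of the edge list by one pass over the edges
-- incrementing a count array indexed by the source vertex (O(n*E) → O(n+E)).

-- ===== PORT A =====
-- for i in range(n): out = 0; for edge in edges: if edge[0] == i: out += 1; outdeg.append(out)
def CountOutDegrees (edges : List (Int × Int)) (n : Int) : List Int :=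
  (PySem.List.pyRange 0 n 1).foldl
    (fun outdeg i =>
      outdeg ++ [edges.foldl (fun out edge => if edge.1 = i then out + 1 else out) 0])
    []

-- ===== PORT B =====
-- outdeg = [0]*n; for (s,_) in edges: if 0 <= s < n: outdeg[s] += 1
def CountOutDegrees_alt (edges : List (Int × Int)) (n : Int) : List Int :=
  edges.foldl
    (fun outdeg e =>
      if 0 ≤ e.1 ∧ e.1 < n then outdeg.modify e.1.toNat (· + 1) else outdeg)
    (List.replicate n.toNat 0)

-- ===== PRECONDITION & SPEC =====
def Spec_CountOutDegrees (edges : List (Int × Int)) (n : Int) (out : List Int) : Prop := out = CountOutDegrees_alt edges n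
instance (edges : List (Int × Int)) (n : Int) (out : List Int) : Decidable (Spec_CountOutDegrees edges n out) := by unfold Spec_CountOutDegrees; infer_instance

-- ===== CLAIM (what is proved, stated in full; the proofs are below) =====
def Claim_equal_CountOutDegrees : Prop := ∀ (edges : List (Int × Int)) (n : Int), Dom_CountOutDegrees edges n → Spec_CountOutDegrees edges n (CountOutDegrees edges n)

-- ===== LEMMAS AND PROOFS =====

-- A's inner loop counts the edges whose source equals i.
theorem a_inner_count (edges : List (Int × Int)) (i : Int) (c : Int) :
    edges.foldl (fun out edge => if edge.1 = i then out + 1 else out) c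
      = c + (edges.countP (fun e => e.1 = i)) := by
  induction edges generalizing c with
  | nil => simp
  | cons e es ih =>
      simp only [List.foldl_cons, List.countP_cons, ih]
      by_cases h : e.1 = i
      · simp [h]; omega
      · simp [h]

-- A's outer loop is a map over the range.
theorem a_outer_map (f : Int → Int) (l : List Int) (acc : List Int) :
    l.foldl (fun outdeg i => outdeg ++ [f i]) acc = acc ++ l.map f := by
  induction l generalizing acc with
  | nil => simp
  | cons x xs ih => simp [ih]

theorem a_eq_map (edges : List (Int × Int)) (n : Int) :
    CountOutDegrees edges n
      = (PySem.List.pyRange 0 n 1).map (fun i => ((edges.countP (fun e => e.1 = i)) : Int)) := by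
  unfold CountOutDegrees
  rw [show (fun (outdeg : List Int) (i : Int) =>
        outdeg ++ [edges.foldl (fun out edge => if edge.1 = i then out + 1 else out) 0])
      = (fun outdeg i => outdeg ++ [(fun i => ((edges.countP (fun e => e.1 = i)) : Int)) i]) from by
        funext outdeg i; rw [a_inner_count]; simp]
  rw [a_outer_map]
  simp

-- Pointwise value of B's fold: each cell accumulates the count of its edges.
theorem b_get? (edges : List (Int × Int)) (n : Int) (acc : List Int) (j : Nat) :
    (edges.foldl
      (fun outdeg e =>
        if 0 ≤ e.1 ∧ e.1 < n then outdeg.modify e.1.toNat (· + 1) else outdeg)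
      acc)[j]?
    = acc[j]?.map
        (fun v => v + ((edges.countP (fun e => decide (0 ≤ e.1 ∧ e.1 < n) && (e.1.toNat == j)) : Nat) : Int)) := by
  induction edges generalizing acc with
  | nil => simp
  | cons e es ih =>
      simp only [List.foldl_cons, List.countP_cons]
      by_cases h : 0 ≤ e.1 ∧ e.1 < n
      · rw [if_pos h, ih, List.getElem?_modify]
        cases hx : acc[j]? with
        | none => simp
        | some v =>
            by_cases hk : e.1.toNat = j
            · simp [hk, h]; omega
            · simp [hk, h]
      · rw [if_neg h, ih]
        simp [h]

-- For an in-range cell j, B's edge predicate coincides with "source = j".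
theorem countP_cond_eq (edges : List (Int × Int)) (n : Int) (j : Nat) (hj : j < n.toNat) :
    edges.countP (fun e => decide (0 ≤ e.1 ∧ e.1 < n) && (e.1.toNat == j))
      = edges.countP (fun e => e.1 = (j : Int)) := by
  apply List.countP_congr
  intro e _
  constructor
  · intro h
    simp only [Bool.and_eq_true, decide_eq_true_eq, beq_iff_eq] at h
    simp only [decide_eq_true_eq]
    omega
  · intro h
    simp only [decide_eq_true_eq] at h
    simp only [Bool.and_eq_true, decide_eq_true_eq, beq_iff_eq]
    omega

theorem b_eq_map (edges : List (Int × Int)) (n : Int) :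
    CountOutDegrees_alt edges n
      = (PySem.List.pyRange 0 n 1).map (fun i => ((edges.countP (fun e => e.1 = i)) : Int)) := by
  unfold CountOutDegrees_alt
  apply List.ext_getElem?
  intro j
  rw [b_get? edges n _ j, List.getElem?_map]
  rw [List.getElem?_replicate, PySem.List.getElem?_pyRange_one]
  by_cases hj : j < n.toNat
  · rw [if_pos hj, if_pos (by omega)]
    rw [countP_cond_eq edges n j hj]
    simp
  · rw [if_neg hj, if_neg (by omega)]
    rfl

-- ===== VERDICT (by name: the statement is the Claim_ definition above) =====
theorem CountOutDegrees_spec : Claim_equal_CountOutDegrees := by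
  intro edges n _
  unfold Spec_CountOutDegrees
  rw [a_eq_map, b_eq_map]
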